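-- pv_equiv track=rewrite | github.com/joselopbau09/Recomendacion | Funciones.py | obtenerDF
-- ===== SOURCE A (Python) =====
-- def obtenerDF(conocimiento):
-- 	'''
-- 	Suma los valores de cada atributo de la base de conocimiento
-- 	'''
-- 	columnas = []
-- 	for columna in range(len(conocimiento[0]) - 1):
-- 		suma = 0
-- 		for renglon in conocimiento:
-- 			suma += renglon[columna]
-- 		columnas.append(suma)
-- 	return columnas
-- ===== SOURCE B (Python) =====
-- def obtenerDF(conocimiento):
--     '''
--     Suma los valores de cada atributo de la base de conocimiento
--     '''
--     n = len(conocimiento[0]) - 1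
--     sums = [0] * n
--     for renglon in conocimiento:
--         sums = [sums[i] + renglon[i] for i in range(n)]
--     return sums
-- ===== Notes on version B (the rewrite author's own statement) =====
-- stated objective: alternative
-- what changed: B maintains one accumulator vector of column sums updated in a single pass over the rows, instead of A's per-column rescan of the whole table for every column.
import Mathlib
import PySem

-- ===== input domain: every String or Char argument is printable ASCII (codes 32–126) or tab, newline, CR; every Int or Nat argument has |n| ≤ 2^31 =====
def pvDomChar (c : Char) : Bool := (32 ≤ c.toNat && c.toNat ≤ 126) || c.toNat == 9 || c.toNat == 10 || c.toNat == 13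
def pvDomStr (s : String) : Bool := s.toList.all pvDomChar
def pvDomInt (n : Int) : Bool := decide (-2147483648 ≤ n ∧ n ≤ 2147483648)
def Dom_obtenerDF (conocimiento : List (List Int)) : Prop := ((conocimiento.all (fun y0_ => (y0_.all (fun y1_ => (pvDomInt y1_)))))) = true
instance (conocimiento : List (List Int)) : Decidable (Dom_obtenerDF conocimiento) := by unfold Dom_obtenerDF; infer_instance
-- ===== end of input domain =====

-- B maintains one accumulator vector of column sums updated in a single pass over the rows,
-- instead of A's per-column rescan of the whole table (same asymptotic cost, one traversal).


-- ===== PORT A =====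
-- per-column scans: for each column index, fold over all rows summing renglon[columna]
def obtenerDF (conocimiento : List (List Int)) : List Int :=
  (List.range ((conocimiento.headD []).length - 1)).foldl
    (fun (columnas : List Int) (columna : Nat) =>
      columnas ++ [conocimiento.foldl
        (fun suma renglon => suma + ((PySem.List.pyGet? renglon (columna : Int)).getD 0)) 0])
    []

-- ===== PORT B =====
-- single pass over rows, keeping the vector of running column sums
def obtenerDF_alt (conocimiento : List (List Int)) : List Int :=
  let n := (conocimiento.headD []).length - 1
  conocimiento.foldl
    (fun sums renglon =>
      (List.range n).map
        (fun (i : Nat) => (sums[i]?.getD 0) + ((PySem.List.pyGet? renglon (i : Int)).getD 0)))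
    (List.replicate n 0)

-- ===== PRECONDITION & SPEC =====
-- Pre_: the Python A raises IndexError on an empty table (conocimiento[0]) and whenever some
-- row is shorter than len(conocimiento[0]) - 1; exactly those inputs are excluded.
def Pre_obtenerDF (conocimiento : List (List Int)) : Prop :=
  conocimiento ≠ [] ∧
  ∀ r ∈ conocimiento, (conocimiento.headD []).length - 1 ≤ r.length
instance (conocimiento : List (List Int)) : Decidable (Pre_obtenerDF conocimiento) := by
  unfold Pre_obtenerDF; infer_instance
def pvWitness_obtenerDF : List (List Int) := [[1, 2, 3], [4, 5, 6]]

def Spec_obtenerDF (conocimiento : List (List Int)) (out : List Int) : Prop := out = obtenerDF_alt conocimiento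
instance (conocimiento : List (List Int)) (out : List Int) : Decidable (Spec_obtenerDF conocimiento out) := by unfold Spec_obtenerDF; infer_instance

-- ===== CLAIM (what is proved, stated in full; the proofs are below) =====
def Claim_equal_obtenerDF : Prop := ∀ (conocimiento : List (List Int)), Dom_obtenerDF conocimiento → Pre_obtenerDF conocimiento → Spec_obtenerDF conocimiento (obtenerDF conocimiento)

-- ===== LEMMAS AND PROOFS =====

-- the value both programs read at row r, column i (total: 0 outside range, unused under Pre_)
def pvCell (r : List Int) (i : Nat) : Int := (PySem.List.pyGet? r (i : Int)).getD 0

-- A's inner loop: the sum of column i over all rows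
def pvColSum (c : List (List Int)) (i : Nat) : Int :=
  c.foldl (fun suma renglon => suma + pvCell renglon i) 0

theorem pvFoldl_shift (c : List (List Int)) (i : Nat) (x : Int) :
    c.foldl (fun a r => a + pvCell r i) x = x + pvColSum c i := by
  induction c generalizing x with
  | nil => simp [pvColSum]
  | cons r c ih =>
    simp only [List.foldl_cons, pvColSum] at *
    rw [ih (x + pvCell r i), ih (0 + pvCell r i)]
    ring

theorem pvColSum_cons (r : List Int) (c : List (List Int)) (i : Nat) :
    pvColSum (r :: c) i = pvCell r i + pvColSum c i := by
  unfold pvColSum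
  rw [List.foldl_cons, pvFoldl_shift]
  simp [pvColSum]

theorem pvA_eq_map (c : List (List Int)) :
    obtenerDF c = (List.range ((c.headD []).length - 1)).map (pvColSum c) := by
  unfold obtenerDF
  generalize (c.headD []).length - 1 = n
  induction n with
  | zero => simp
  | succ n ih =>
    rw [List.range_succ]
    simp only [List.foldl_append, List.foldl_cons, List.foldl_nil, List.map_append, ih]
    simp [pvColSum, pvCell]

theorem pvB_invariant (n : Nat) (c : List (List Int)) (g : Nat → Int) :
    c.foldl
      (fun sums renglon =>
        (List.range n).map (fun i => (sums[i]?.getD 0) + pvCell renglon i))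
      ((List.range n).map g)
    = (List.range n).map (fun i => g i + pvColSum c i) := by
  induction c generalizing g with
  | nil => simp [pvColSum]
  | cons r c ih =>
    simp only [List.foldl_cons]
    have hstep :
        (List.range n).map (fun i => ((((List.range n).map g)[i]?).getD 0) + pvCell r i)
        = (List.range n).map (fun i => g i + pvCell r i) := by
      apply List.map_congr_left
      intro i hi
      simp only [List.getElem?_map]
      rw [List.getElem?_range (List.mem_range.mp hi)]
      simp
    rw [hstep, ih (fun i => g i + pvCell r i)]
    apply List.map_congr_left
    intro i _
    rw [pvColSum_cons]
    ring

theorem pvB_eq_map (c : List (List Int)) :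
    obtenerDF_alt c = (List.range ((c.headD []).length - 1)).map (pvColSum c) := by
  unfold obtenerDF_alt
  have hc : ∀ (r : List Int) (i : Nat), (PySem.List.pyGet? r (i : Int)).getD 0 = pvCell r i :=
    fun _ _ => rfl
  simp only [hc]
  generalize (c.headD []).length - 1 = n
  have hrep : (List.replicate n (0 : Int)) = (List.range n).map (fun _ => 0) := by
    simp [List.map_const']
  rw [hrep, pvB_invariant n c (fun _ => 0)]
  simp

-- ===== VERDICT (by name: the statement is the Claim_ definition above) =====
theorem obtenerDF_spec : Claim_equal_obtenerDF := by
  intro c _ _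
  unfold Spec_obtenerDF
  rw [pvA_eq_map, pvB_eq_map]
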